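-- pv_equiv track=rewrite | github.com/jieunlee0106/TIL | algo/booking.py | booking_room
-- ===== SOURCE A (Python) =====
-- from collections import deque
--
-- def booking_room(customer, k):
--     q = deque() # 예약 대기자 고객 Id를 담는 Queue
--     room = [] # 방을 배정 받은 고객 Id를 담는 List
--     for c in customer:
--         customer_id, is_booking = c[0], c[1]
--         # 예약
--         if is_booking == 1:
--             if k > 0: # 남은 방 있을 경우
--                 room.append(customer_id)
--                 k -= 1
--             else: # 남은 방 없을 경우
--                 q.append(customer_id)
--         # 예약 취소
--         if is_booking == 0:
--             if customer_id in room: # 방을 배정 받은 경우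
--                 room.remove(customer_id)
--                 k += 1
--             if customer_id in q: # 대기자 명단에 있는 경우
--                 q.remove(customer_id)
--         # 빈 방 있을 시 우선 대기자 부터 방 배정
--         if k > 0 and q:
--             room.append(q.popleft())
--             k -= 1
--     return room
-- ===== SOURCE B (Python) =====
-- from collections import deque, Counter
--
-- def booking_room(customer, k):
--     # One pass with O(1) updates: append-only room log + lazy removals,
--     # waitlist deque with lazy (counter-marked) deletions.
--     order = []            # append-only log of room assignments
--     removed = Counter()   # id -> number of earliest log occurrences cancelled
--     live = Counter()      # id -> live count currently in a room
--     q = deque()           # waitlist (may contain lazily-deleted entries)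
--     q_dead = Counter()    # id -> pending lazy deletions in q
--     q_live = Counter()    # id -> live count in waitlist
--     q_size = 0            # number of live waitlist entries
--     for c in customer:
--         cid, flag = c[0], c[1]
--         if flag == 1:
--             if k > 0:
--                 order.append(cid); live[cid] += 1; k -= 1
--             else:
--                 q.append(cid); q_live[cid] += 1; q_size += 1
--         if flag == 0:
--             if live[cid] > 0:
--                 live[cid] -= 1; removed[cid] += 1; k += 1
--             if q_live[cid] > 0:
--                 q_live[cid] -= 1; q_dead[cid] += 1; q_size -= 1
--         if k > 0 and q_size > 0:
--             x = q.popleft()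
--             while q_dead[x] > 0:
--                 q_dead[x] -= 1
--                 x = q.popleft()
--             order.append(x); live[x] += 1; q_live[x] -= 1; q_size -= 1; k -= 1
--     res = []
--     for x in order:
--         if removed[x] > 0:
--             removed[x] -= 1
--         else:
--             res.append(x)
--     return res
-- ===== Notes on version B (the rewrite author's own statement) =====
-- stated objective: alternative
-- what changed: Replaces A's per-event scans ('in' and '.remove' on the room list and waitlist deque) with an append-only room log plus occurrence counters and lazy deletions, resolved in one final purge pass; per-event work becomes O(1) counter updates instead of list scans.
import Mathlib
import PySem

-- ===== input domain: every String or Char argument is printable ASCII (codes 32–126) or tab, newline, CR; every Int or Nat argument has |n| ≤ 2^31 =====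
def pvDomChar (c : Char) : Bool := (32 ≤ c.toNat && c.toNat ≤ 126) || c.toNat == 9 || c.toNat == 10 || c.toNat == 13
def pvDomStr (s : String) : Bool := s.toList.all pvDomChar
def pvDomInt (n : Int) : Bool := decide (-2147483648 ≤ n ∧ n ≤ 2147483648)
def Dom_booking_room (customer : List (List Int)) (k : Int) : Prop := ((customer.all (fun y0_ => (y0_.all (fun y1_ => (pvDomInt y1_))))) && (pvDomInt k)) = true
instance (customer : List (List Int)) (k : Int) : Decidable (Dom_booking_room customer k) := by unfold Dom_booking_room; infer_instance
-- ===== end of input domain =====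

-- B replaces A's per-event list/deque scans (`in`, `.remove`) with an append-only room log,
-- occurrence counters and lazy deletions resolved by one final purge pass (a different algorithm;
-- not measured faster on the generated inputs).

-- ===== PORT A =====
-- list.remove / deque.remove: drop the first occurrence (always guarded by membership in A)
def pyRemove : List Int → Int → List Int
  | [], _ => []
  | x :: xs, a => if x = a then xs else x :: pyRemove xs a

-- the three sequential `if` blocks of A's loop body
def phase1A (cid fl : Int) : List Int × List Int × Int → List Int × List Int × Int
  | (room, q, k) =>
    if fl = 1 then
      if k > 0 then (room ++ [cid], q, k - 1) else (room, q ++ [cid], k)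
    else (room, q, k)

def phase2A (cid fl : Int) : List Int × List Int × Int → List Int × List Int × Int
  | (room, q, k) =>
    if fl = 0 then
      let rk := if room.contains cid then (pyRemove room cid, k + 1) else (room, k)
      let q2 := if q.contains cid then pyRemove q cid else q
      (rk.1, q2, rk.2)
    else (room, q, k)

def phase3A : List Int × List Int × Int → List Int × List Int × Int
  | (room, q, k) =>
    if k > 0 then
      match q with
      | [] => (room, [], k)
      | x :: rest => (room ++ [x], rest, k - 1)
    else (room, q, k)

def stepA (st : List Int × List Int × Int) (c : List Int) : List Int × List Int × Int :=
  match PySem.List.pyGet? c 0, PySem.List.pyGet? c 1 with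
  | some cid, some fl => phase3A (phase2A cid fl (phase1A cid fl st))
  | _, _ => st  -- Python raises IndexError here; excluded by Pre_booking_room

def booking_room (customer : List (List Int)) (k : Int) : List Int :=
  (customer.foldl stepA ([], [], k)).1

-- ===== PORT B =====
-- Counters hold only nonnegative values in Source B (each decrement is guarded by `> 0`),
-- so they are ported as Int → Nat maps with default 0.
def cinc (f : Int → Nat) (a : Int) : Int → Nat := fun y => if y = a then f y + 1 else f y
def cdec (f : Int → Nat) (a : Int) : Int → Nat := fun y => if y = a then f y - 1 else f y

structure BState where
  order : List Int
  removed : Int → Nat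
  live : Int → Nat
  q : List Int
  qdead : Int → Nat
  qlive : Int → Nat
  qsize : Int
  k : Int

-- Source B's `x = q.popleft(); while q_dead[x] > 0: q_dead[x] -= 1; x = q.popleft()`
-- (only entered when q_size > 0, so the [] case is unreachable on admitted inputs)
def popLive : List Int → (Int → Nat) → Int × List Int × (Int → Nat)
  | [], d => (0, [], d)
  | x :: xs, d => if d x > 0 then popLive xs (cdec d x) else (x, xs, d)

def phase1B (cid fl : Int) (s : BState) : BState :=
  if fl = 1 then
    if s.k > 0 then { s with order := s.order ++ [cid], live := cinc s.live cid, k := s.k - 1 }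
    else { s with q := s.q ++ [cid], qlive := cinc s.qlive cid, qsize := s.qsize + 1 }
  else s

def phase2B (cid fl : Int) (s : BState) : BState :=
  if fl = 0 then
    let s1 := if s.live cid > 0 then
        { s with live := cdec s.live cid, removed := cinc s.removed cid, k := s.k + 1 }
      else s
    if s1.qlive cid > 0 then
      { s1 with qlive := cdec s1.qlive cid, qdead := cinc s1.qdead cid, qsize := s1.qsize - 1 }
    else s1
  else s

def phase3B (s : BState) : BState :=
  if s.k > 0 ∧ s.qsize > 0 then
    match popLive s.q s.qdead with
    | (x, q', d') =>
      { order := s.order ++ [x], removed := s.removed, live := cinc s.live x,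
        q := q', qdead := d', qlive := cdec s.qlive x, qsize := s.qsize - 1, k := s.k - 1 }
  else s

def stepB (s : BState) (c : List Int) : BState :=
  match PySem.List.pyGet? c 0, PySem.List.pyGet? c 1 with
  | some cid, some fl => phase3B (phase2B cid fl (phase1B cid fl s))
  | _, _ => s  -- Python raises IndexError here; excluded by Pre_booking_room

-- Source B's final scan dropping, per id, the first `removed[id]` log occurrences
def purge : List Int → (Int → Nat) → List Int
  | [], _ => []
  | x :: xs, rem => if rem x > 0 then purge xs (cdec rem x) else x :: purge xs rem

def booking_room_alt (customer : List (List Int)) (k : Int) : List Int :=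
  let s := customer.foldl stepB ⟨[], fun _ => 0, fun _ => 0, [], fun _ => 0, fun _ => 0, 0, k⟩
  purge s.order s.removed

-- ===== PRECONDITION & SPEC =====
-- Pre_ excludes exactly the inputs where Python A raises IndexError: an inner list with
-- fewer than two elements (A reads c[0] and c[1]).
def Pre_booking_room (customer : List (List Int)) (k : Int) : Prop :=
  ∀ c ∈ customer, 2 ≤ c.length
instance (customer : List (List Int)) (k : Int) : Decidable (Pre_booking_room customer k) := by
  unfold Pre_booking_room; infer_instance

def pvWitness_booking_room : List (List Int) × Int := ([[1, 1], [2, 1], [3, 1], [1, 0], [2, 0]], 1)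

def Spec_booking_room (customer : List (List Int)) (k : Int) (out : List Int) : Prop := out = booking_room_alt customer k
instance (customer : List (List Int)) (k : Int) (out : List Int) : Decidable (Spec_booking_room customer k out) := by unfold Spec_booking_room; infer_instance

-- ===== CLAIM (what is proved, stated in full; the proofs are below) =====
def Claim_equal_booking_room : Prop := ∀ (customer : List (List Int)) (k : Int), Dom_booking_room customer k → Pre_booking_room customer k → Spec_booking_room customer k (booking_room customer k)

-- ===== LEMMAS AND PROOFS =====

-- `rem` is fully absorbed by the occurrences in `l`
def Absorbed (l : List Int) (rem : Int → Nat) : Prop := ∀ x, rem x ≤ l.count x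

-- the simulation invariant: A's (room, q, k) against B's lazy state
def SimInv (room q : List Int) (k : Int) (s : BState) : Prop :=
  room = purge s.order s.removed ∧ Absorbed s.order s.removed ∧
  (∀ x, s.live x = room.count x) ∧
  q = purge s.q s.qdead ∧ Absorbed s.q s.qdead ∧
  (∀ x, s.qlive x = q.count x) ∧
  s.qsize = (q.length : Int) ∧
  s.k = k

theorem absorbed_cdec (x : Int) (xs : List Int) (rem : Int → Nat)
    (h : Absorbed (x :: xs) rem) : Absorbed xs (cdec rem x) := by
  intro z
  have := h z
  by_cases hz : z = x
  · subst hz; simp [cdec, List.count_cons] at this ⊢; omega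
  · simp [cdec, hz, List.count_cons, Ne.symm hz] at this ⊢; omega

theorem absorbed_tail (x : Int) (xs : List Int) (rem : Int → Nat)
    (h : Absorbed (x :: xs) rem) (hx0 : rem x = 0) : Absorbed xs rem := by
  intro z
  have := h z
  by_cases hz : z = x
  · subst hz; omega
  · simp [List.count_cons, Ne.symm hz] at this; omega

theorem count_purge (l : List Int) (rem : Int → Nat) (h : Absorbed l rem) (y : Int) :
    (purge l rem).count y = l.count y - rem y := by
  induction l generalizing rem with
  | nil =>
    have h0 : rem y = 0 := by have := h y; simpa using this
    simp [purge, h0]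
  | cons x xs ih =>
    by_cases hx : rem x > 0
    · have hab := absorbed_cdec x xs rem h
      have hxx : rem x ≤ xs.count x + 1 := by
        have := h x; simp [List.count_cons] at this; omega
      rw [show purge (x :: xs) rem = purge xs (cdec rem x) by simp [purge, hx]]
      rw [ih (cdec rem x) hab]
      by_cases hy : y = x
      · subst hy; simp [cdec, List.count_cons]; omega
      · simp [cdec, hy, List.count_cons, Ne.symm hy]
    · have hx0 : rem x = 0 := by omega
      have hab := absorbed_tail x xs rem h hx0
      rw [show purge (x :: xs) rem = x :: purge xs rem by simp [purge, hx]]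
      have hle : rem y ≤ xs.count y := hab y
      by_cases hy : y = x
      · subst hy
        simp [List.count_cons, ih rem hab, hx0]
      · simp [List.count_cons, Ne.symm hy, ih rem hab]

theorem purge_append (l : List Int) (rem : Int → Nat) (h : Absorbed l rem) (a : Int) :
    purge (l ++ [a]) rem = purge l rem ++ [a] := by
  induction l generalizing rem with
  | nil =>
    have h0 : rem a = 0 := by have := h a; simpa using this
    simp [purge, h0]
  | cons x xs ih =>
    by_cases hx : rem x > 0
    · have hab := absorbed_cdec x xs rem h
      rw [show ((x :: xs) ++ [a]) = x :: (xs ++ [a]) by simp]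
      rw [show purge (x :: (xs ++ [a])) rem = purge (xs ++ [a]) (cdec rem x) by simp [purge, hx]]
      rw [show purge (x :: xs) rem = purge xs (cdec rem x) by simp [purge, hx]]
      exact ih (cdec rem x) hab
    · have hx0 : rem x = 0 := by omega
      have hab := absorbed_tail x xs rem h hx0
      rw [show ((x :: xs) ++ [a]) = x :: (xs ++ [a]) by simp]
      rw [show purge (x :: (xs ++ [a])) rem = x :: purge (xs ++ [a]) rem by simp [purge, hx]]
      rw [show purge (x :: xs) rem = x :: purge xs rem by simp [purge, hx]]
      simp [ih rem hab]

theorem purge_cinc (l : List Int) (rem : Int → Nat) (h : Absorbed l rem) (a : Int)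
    (hc : 0 < (purge l rem).count a) :
    purge l (cinc rem a) = pyRemove (purge l rem) a := by
  induction l generalizing rem with
  | nil => simp [purge] at hc
  | cons x xs ih =>
    by_cases hx : rem x > 0
    · have hab := absorbed_cdec x xs rem h
      have hxi : (cinc rem a) x > 0 := by
        simp only [cinc]; split_ifs <;> omega
      have hcm : cdec (cinc rem a) x = cinc (cdec rem x) a := by
        funext y
        rcases eq_or_ne y x with rfl | h1 <;> rcases eq_or_ne y a with rfl | h2 <;>
          simp [cdec, cinc, *] <;> omega
      have hc' : 0 < (purge xs (cdec rem x)).count a := by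
        simpa [purge, hx] using hc
      rw [show purge (x :: xs) (cinc rem a) = purge xs (cdec (cinc rem a) x) by simp [purge, hxi]]
      rw [show purge (x :: xs) rem = purge xs (cdec rem x) by simp [purge, hx]]
      rw [hcm]
      exact ih (cdec rem x) hab hc'
    · have hx0 : rem x = 0 := by omega
      have hab := absorbed_tail x xs rem h hx0
      by_cases hax : a = x
      · subst hax
        have hxi : (cinc rem a) a > 0 := by simp [cinc]
        have hcm : cdec (cinc rem a) a = rem := by
          funext y
          rcases eq_or_ne y a with rfl | h1 <;> simp [cdec, cinc, *]
        rw [show purge (a :: xs) (cinc rem a) = purge xs (cdec (cinc rem a) a) by simp [purge, hxi]]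
        rw [show purge (a :: xs) rem = a :: purge xs rem by simp [purge, hx]]
        rw [hcm]
        simp [pyRemove]
      · have hxi : ¬ (cinc rem a) x > 0 := by simp [cinc, Ne.symm hax]; omega
        have hc' : 0 < (purge xs rem).count a := by
          rw [show purge (x :: xs) rem = x :: purge xs rem by simp [purge, hx]] at hc
          simpa [List.count_cons, Ne.symm hax] using hc
        rw [show purge (x :: xs) (cinc rem a) = x :: purge xs (cinc rem a) by simp [purge, hxi]]
        rw [show purge (x :: xs) rem = x :: purge xs rem by simp [purge, hx]]
        simp [pyRemove, Ne.symm hax, ih rem hab hc']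

theorem popLive_spec (q : List Int) (d : Int → Nat) (h : Absorbed q d)
    (hne : purge q d ≠ []) :
    purge q d = (popLive q d).1 :: purge (popLive q d).2.1 (popLive q d).2.2 ∧
      Absorbed (popLive q d).2.1 (popLive q d).2.2 := by
  induction q generalizing d with
  | nil => simp [purge] at hne
  | cons x xs ih =>
    by_cases hx : d x > 0
    · have hab := absorbed_cdec x xs d h
      have hne' : purge xs (cdec d x) ≠ [] := by simpa [purge, hx] using hne
      have := ih (cdec d x) hab hne'
      simpa [purge, hx, popLive] using this
    · have hx0 : d x = 0 := by omega
      have hab := absorbed_tail x xs d h hx0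
      simp [purge, hx, popLive, hab]

theorem count_pyRemove (l : List Int) (a : Int) (h : a ∈ l) (y : Int) :
    (pyRemove l a).count y = l.count y - (if y = a then 1 else 0) := by
  induction l with
  | nil => simp at h
  | cons x xs ih =>
    by_cases hx : x = a
    · subst hx
      simp [pyRemove, List.count_cons]
      rcases eq_or_ne y x with rfl | hy
      · simp
      · simp [hy, Ne.symm hy]
    · have hm : a ∈ xs := by
        rcases List.mem_cons.mp h with h1 | h1
        · exact absurd h1.symm hx
        · exact h1
      have hcnt : (if y = a then 1 else 0) ≤ xs.count y := by
        by_cases hy : y = a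
        · simp [hy]; exact hm
        · simp [hy]
      simp [pyRemove, hx, List.count_cons, ih hm]
      by_cases hy : y = x <;> by_cases hy2 : y = a <;> simp_all <;> omega

theorem length_pyRemove (l : List Int) (a : Int) (h : a ∈ l) :
    (pyRemove l a).length = l.length - 1 := by
  induction l with
  | nil => simp at h
  | cons x xs ih =>
    by_cases hx : x = a
    · simp [pyRemove, hx]
    · have hm : a ∈ xs := by
        rcases List.mem_cons.mp h with h1 | h1
        · exact absurd h1.symm hx
        · exact h1
      have h1 : 1 ≤ xs.length := List.length_pos_of_mem hm
      simp [pyRemove, hx, ih hm] <;> omega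

theorem phase1_inv (cid fl : Int) (room q : List Int) (k : Int) (s : BState)
    (h : SimInv room q k s) :
    SimInv (phase1A cid fl (room, q, k)).1 (phase1A cid fl (room, q, k)).2.1
      (phase1A cid fl (room, q, k)).2.2 (phase1B cid fl s) := by
  obtain ⟨hroom, habs, hlive, hq, hqabs, hqlive, hqsize, hk⟩ := h
  by_cases hfl : fl = 1
  · by_cases hk0 : k > 0
    · have hk0' : s.k > 0 := by omega
      simp only [phase1A, phase1B, hfl, hk0, hk0', if_true]
      refine ⟨?_, ?_, ?_, hq, hqabs, hqlive, hqsize, by simp; omega⟩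
      · rw [hroom]; exact (purge_append s.order s.removed habs cid).symm
      · intro x; have := habs x; simp only [List.count_append]; omega
      · intro x
        rcases eq_or_ne x cid with rfl | hx
        · simp [cinc, List.count_append, List.count_cons, hlive x]
        · simp [cinc, hx, List.count_append, List.count_cons, Ne.symm hx, hlive x]
    · have hk0' : ¬ s.k > 0 := by omega
      simp only [phase1A, phase1B, hfl, hk0, hk0', if_true, if_false]
      refine ⟨hroom, habs, hlive, ?_, ?_, ?_, ?_, hk⟩
      · rw [hq]; exact (purge_append s.q s.qdead hqabs cid).symm
      · intro x; have := hqabs x; simp only [List.count_append]; omega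
      · intro x
        rcases eq_or_ne x cid with rfl | hx
        · simp [cinc, List.count_append, List.count_cons, hqlive x]
        · simp [cinc, hx, List.count_append, List.count_cons, Ne.symm hx, hqlive x]
      · simp [List.length_append]; omega
  · simp only [phase1A, phase1B, hfl, if_false]
    exact ⟨hroom, habs, hlive, hq, hqabs, hqlive, hqsize, hk⟩


theorem phase2_inv (cid fl : Int) (room q : List Int) (k : Int) (s : BState)
    (h : SimInv room q k s) :
    SimInv (phase2A cid fl (room, q, k)).1 (phase2A cid fl (room, q, k)).2.1
      (phase2A cid fl (room, q, k)).2.2 (phase2B cid fl s) := by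
  obtain ⟨hroom, habs, hlive, hq, hqabs, hqlive, hqsize, hk⟩ := h
  by_cases hfl : fl = 0
  · simp only [phase2A, phase2B, hfl, if_true]
    have hcnt_room := count_purge s.order s.removed habs
    have hcnt_q := count_purge s.q s.qdead hqabs
    by_cases hr : s.live cid > 0
    · have hrc : 0 < room.count cid := by rw [← hlive cid]; exact hr
      have hmem : cid ∈ room := List.count_pos_iff.mp hrc
      have hcontains : room.contains cid = true := by
        simpa using hmem
      have hroomc : 0 < (purge s.order s.removed).count cid := by rw [← hroom]; exact hrc
      have habs' : Absorbed s.order (cinc s.removed cid) := by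
        intro x; have h1 := habs x
        have h2 := hcnt_room cid
        rcases eq_or_ne x cid with rfl | hx
        · simp [cinc]; omega
        · simp [cinc, hx]; exact h1
      have hnewroom : pyRemove room cid = purge s.order (cinc s.removed cid) := by
        rw [hroom]; exact (purge_cinc s.order s.removed habs cid hroomc).symm
      by_cases hql : s.qlive cid > 0
      · have hqc : 0 < q.count cid := by rw [← hqlive cid]; exact hql
        have hqmem : cid ∈ q := List.count_pos_iff.mp hqc
        have hqcontains : q.contains cid = true := by simpa using hqmem
        have hqroomc : 0 < (purge s.q s.qdead).count cid := by rw [← hq]; exact hqc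
        have hqabs' : Absorbed s.q (cinc s.qdead cid) := by
          intro x; have h1 := hqabs x
          have h2 := hcnt_q cid
          rcases eq_or_ne x cid with rfl | hx
          · simp [cinc]; omega
          · simp [cinc, hx]; exact h1
        simp only [hcontains, hqcontains, hr, hql, if_true, if_pos]
        refine ⟨hnewroom, habs', ?_, ?_, hqabs', ?_, ?_, by simp; omega⟩
        · intro x
          have := count_pyRemove room cid hmem x
          rcases eq_or_ne x cid with rfl | hx
          · simp [cdec]; rw [this, ← hlive x]; simp
          · simp [cdec, hx]; rw [this, ← hlive x]; simp [hx]
        · rw [hq]; exact (purge_cinc s.q s.qdead hqabs cid hqroomc).symm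
        · intro x
          have := count_pyRemove q cid hqmem x
          rcases eq_or_ne x cid with rfl | hx
          · simp [cdec]; rw [this, ← hqlive x]; simp
          · simp [cdec, hx]; rw [this, ← hqlive x]; simp [hx]
        · have := length_pyRemove q cid hqmem
          have hlen : 1 ≤ q.length := List.length_pos_of_mem hqmem
          simp [this]; omega
      · have hqc : q.count cid = 0 := by have := hqlive cid; omega
        have hqmem : cid ∉ q := by
          intro hm; exact absurd (List.count_pos_iff.mpr hm) (by omega)
        have hqcontains : ¬ q.contains cid = true := by simpa using hqmem
        simp only [hcontains, hqcontains, hr, hql, if_true, if_pos, if_neg, if_false]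
        exact ⟨hnewroom, habs', by
          intro x
          have := count_pyRemove room cid hmem x
          rcases eq_or_ne x cid with rfl | hx
          · simp [cdec]; rw [this, ← hlive x]; simp
          · simp [cdec, hx]; rw [this, ← hlive x]; simp [hx],
          hq, hqabs, hqlive, hqsize, by simp; omega⟩
    · have hrc : room.count cid = 0 := by have := hlive cid; omega
      have hmem : cid ∉ room := by
        intro hm; exact absurd (List.count_pos_iff.mpr hm) (by omega)
      have hcontains : ¬ room.contains cid = true := by simpa using hmem
      by_cases hql : s.qlive cid > 0
      · have hqc : 0 < q.count cid := by rw [← hqlive cid]; exact hql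
        have hqmem : cid ∈ q := List.count_pos_iff.mp hqc
        have hqcontains : q.contains cid = true := by simpa using hqmem
        have hqroomc : 0 < (purge s.q s.qdead).count cid := by rw [← hq]; exact hqc
        have hqabs' : Absorbed s.q (cinc s.qdead cid) := by
          intro x; have h1 := hqabs x
          have h2 := hcnt_q cid
          rcases eq_or_ne x cid with rfl | hx
          · simp [cinc]; omega
          · simp [cinc, hx]; exact h1
        simp only [hcontains, hqcontains, hr, hql, if_true, if_neg, if_false, if_pos]
        refine ⟨hroom, habs, hlive, ?_, hqabs', ?_, ?_, hk⟩
        · rw [hq]; exact (purge_cinc s.q s.qdead hqabs cid hqroomc).symm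
        · intro x
          have := count_pyRemove q cid hqmem x
          rcases eq_or_ne x cid with rfl | hx
          · simp [cdec]; rw [this, ← hqlive x]; simp
          · simp [cdec, hx]; rw [this, ← hqlive x]; simp [hx]
        · have := length_pyRemove q cid hqmem
          have hlen : 1 ≤ q.length := List.length_pos_of_mem hqmem
          simp [this]; omega
      · have hqc : q.count cid = 0 := by have := hqlive cid; omega
        have hqmem : cid ∉ q := by
          intro hm; exact absurd (List.count_pos_iff.mpr hm) (by omega)
        have hqcontains : ¬ q.contains cid = true := by simpa using hqmem
        simp only [hcontains, hqcontains, hr, hql, if_neg, if_false]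
        exact ⟨hroom, habs, hlive, hq, hqabs, hqlive, hqsize, hk⟩
  · simp only [phase2A, phase2B, hfl, if_false]
    exact ⟨hroom, habs, hlive, hq, hqabs, hqlive, hqsize, hk⟩


theorem phase3_inv (room q : List Int) (k : Int) (s : BState)
    (h : SimInv room q k s) :
    SimInv (phase3A (room, q, k)).1 (phase3A (room, q, k)).2.1
      (phase3A (room, q, k)).2.2 (phase3B s) := by
  obtain ⟨hroom, habs, hlive, hq, hqabs, hqlive, hqsize, hk⟩ := h
  by_cases hk0 : k > 0
  · match hqe : q with
    | [] =>
      have hsz : ¬ s.qsize > 0 := by rw [hqsize]; simp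
      have : ¬ (s.k > 0 ∧ s.qsize > 0) := by tauto
      simp only [phase3A, phase3B, hk0, this, if_true, if_false]
      exact ⟨hroom, habs, hlive, hq, hqabs, hqlive, hqsize, hk⟩
    | x :: rest =>
      have hk0' : s.k > 0 := by omega
      have hsz : s.qsize > 0 := by rw [hqsize]; simp
      have hcond : s.k > 0 ∧ s.qsize > 0 := ⟨hk0', hsz⟩
      have hne : purge s.q s.qdead ≠ [] := by rw [← hq]; simp
      have hpl := popLive_spec s.q s.qdead hqabs hne
      have hx : (popLive s.q s.qdead).1 = x ∧
          purge (popLive s.q s.qdead).2.1 (popLive s.q s.qdead).2.2 = rest := by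
        have := hpl.1
        rw [← hq] at this
        exact ⟨(List.cons.injEq _ _ _ _).mp this.symm |>.1,
               ((List.cons.injEq _ _ _ _).mp this.symm |>.2)⟩
      simp only [phase3A, phase3B, hk0, hcond, and_self, if_true]
      refine ⟨?_, ?_, ?_, ?_, ?_, ?_, ?_, by simp; omega⟩
      · simp only [hx.1]
        rw [hroom]; exact (purge_append s.order s.removed habs x).symm
      · intro y; have := habs y; simp only [List.count_append]; omega
      · intro y
        simp only [hx.1]
        rcases eq_or_ne y x with rfl | hy
        · simp [cinc, List.count_append, List.count_cons, hlive y]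
        · simp [cinc, hy, List.count_append, List.count_cons, Ne.symm hy, hlive y]
      · exact hx.2.symm
      · exact hpl.2
      · intro y
        simp only [hx.1]
        have := hqlive y
        rcases eq_or_ne y x with rfl | hy
        · simp [cdec]; rw [this]; simp [List.count_cons]
        · simp [cdec, hy]; rw [this]; simp [List.count_cons, Ne.symm hy, hy]
      · simp only [List.length_cons] at hqsize; simp; omega
  · have : ¬ (s.k > 0 ∧ s.qsize > 0) := by intro hc; exact hk0 (by omega)
    simp only [phase3A, phase3B, hk0, this, if_false]
    exact ⟨hroom, habs, hlive, hq, hqabs, hqlive, hqsize, hk⟩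


theorem step_inv (st : List Int × List Int × Int) (s : BState) (c : List Int)
    (h : SimInv st.1 st.2.1 st.2.2 s) :
    SimInv (stepA st c).1 (stepA st c).2.1 (stepA st c).2.2 (stepB s c) := by
  unfold stepA stepB
  match PySem.List.pyGet? c 0, PySem.List.pyGet? c 1 with
  | some cid, some fl =>
    obtain ⟨r, q, k⟩ := st
    exact phase3_inv _ _ _ _ (phase2_inv cid fl _ _ _ _ (phase1_inv cid fl r q k s h))
  | some _, none => exact h
  | none, _ => exact h


theorem fold_inv (customer : List (List Int)) (st : List Int × List Int × Int) (s : BState)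
    (h : SimInv st.1 st.2.1 st.2.2 s) :
    SimInv (customer.foldl stepA st).1 (customer.foldl stepA st).2.1
      (customer.foldl stepA st).2.2 (customer.foldl stepB s) := by
  induction customer generalizing st s with
  | nil => exact h
  | cons c cs ih => exact ih _ _ (step_inv st s c h)

-- ===== VERDICT (by name: the statement is the Claim_ definition above) =====
theorem booking_room_spec : Claim_equal_booking_room := by
  intro customer k _ _
  unfold Spec_booking_room booking_room booking_room_alt
  have h0 : SimInv (([] : List Int), ([] : List Int), k).1 (([] : List Int), ([] : List Int), k).2.1
      (([] : List Int), ([] : List Int), k).2.2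
      ⟨[], fun _ => 0, fun _ => 0, [], fun _ => 0, fun _ => 0, 0, k⟩ := by
    refine ⟨rfl, fun x => by simp [List.count_nil], fun x => by simp, rfl,
      fun x => by simp [List.count_nil], fun x => by simp, by simp, rfl⟩
  have h := fold_inv customer ([], [], k) _ h0
  exact h.1
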